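-- pv_equiv track=rewrite | github.com/Cxvarisorka/python_manual_methods | list_methods/manual_insert.py | manual_insert
-- ===== SOURCE A (Python) =====
-- def manual_insert(collection, item_insert, index_insert):
--     if index_insert < 0:
--         index_insert = len(collection) + index_insert
--
--     result = []
--
--     for index in range(len(collection)):
--         if index == index_insert:
--             result.append(item_insert)
--             result.append(collection[index])
--         else:
--             result.append(collection[index])
--
--     return result
-- ===== SOURCE B (Python) =====
-- def manual_insert(collection, item_insert, index_insert):
--     if index_insert < 0:
--         index_insert = len(collection) + index_insert
--     base = list(collection)
--     if 0 <= index_insert < len(base):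
--         return base[:index_insert] + [item_insert] + base[index_insert:]
--     return base
-- ===== Notes on version B (the rewrite author's own statement) =====
-- stated objective: simpler
-- what changed: Replaces the element-by-element append loop over range(len) with a direct slice-and-concatenate build (base[:i] + [item] + base[i:]), returning a plain copy when the adjusted index is out of range.
import Mathlib
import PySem

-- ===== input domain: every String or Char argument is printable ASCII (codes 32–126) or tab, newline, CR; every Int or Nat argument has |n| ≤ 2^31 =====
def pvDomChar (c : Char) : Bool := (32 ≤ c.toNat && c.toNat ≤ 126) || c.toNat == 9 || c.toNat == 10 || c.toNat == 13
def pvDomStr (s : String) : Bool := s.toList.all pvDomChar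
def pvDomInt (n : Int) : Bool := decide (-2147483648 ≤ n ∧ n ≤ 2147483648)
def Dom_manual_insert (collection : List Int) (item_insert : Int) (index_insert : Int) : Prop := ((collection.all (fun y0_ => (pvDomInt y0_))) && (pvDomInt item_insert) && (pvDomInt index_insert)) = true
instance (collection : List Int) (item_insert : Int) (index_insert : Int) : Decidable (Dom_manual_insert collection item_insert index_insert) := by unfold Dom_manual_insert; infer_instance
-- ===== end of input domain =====

-- B replaces A's element-by-element append loop with slice-and-concatenate; objective: simpler.

-- ===== PORT A =====
-- collection[index] with index drawn from range(len(collection)) is always in range,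
-- so pyGetD with default 0 is exact here.
def manual_insert (collection : List Int) (item_insert : Int) (index_insert : Int) : List Int :=
  let idx := if index_insert < 0 then (collection.length : Int) + index_insert else index_insert
  (PySem.List.pyRange 0 (collection.length : Int) 1).foldl
    (fun result index =>
      if index = idx then
        result ++ [item_insert] ++ [PySem.List.pyGetD collection index 0]
      else
        result ++ [PySem.List.pyGetD collection index 0]) []

-- ===== PORT B =====
def manual_insert_alt (collection : List Int) (item_insert : Int) (index_insert : Int) : List Int :=
  let idx := if index_insert < 0 then (collection.length : Int) + index_insert else index_insert
  if 0 ≤ idx ∧ idx < (collection.length : Int) then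
    PySem.List.slice collection none (some idx) ++ [item_insert] ++
      PySem.List.slice collection (some idx) none
  else
    collection

-- ===== PRECONDITION & SPEC =====
def Spec_manual_insert (collection : List Int) (item_insert : Int) (index_insert : Int) (out : List Int) : Prop := out = manual_insert_alt collection item_insert index_insert
instance (collection : List Int) (item_insert : Int) (index_insert : Int) (out : List Int) : Decidable (Spec_manual_insert collection item_insert index_insert out) := by unfold Spec_manual_insert; infer_instance

-- ===== CLAIM (what is proved, stated in full; the proofs are below) =====
def Claim_equal_manual_insert : Prop := ∀ (collection : List Int) (item_insert : Int) (index_insert : Int), Dom_manual_insert collection item_insert index_insert → Spec_manual_insert collection item_insert index_insert (manual_insert collection item_insert index_insert)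

-- ===== LEMMAS AND PROOFS =====

-- A's loop body rewritten as 'acc ++ g j' so the flatMap loop-shape lemma applies
theorem pv_step_eq (item : Int) (c : List Int) (idx : Int) :
    (fun (result : List Int) (index : Int) =>
      if index = idx then
        result ++ [item] ++ [PySem.List.pyGetD c index 0]
      else
        result ++ [PySem.List.pyGetD c index 0])
    = (fun result index => result ++
        (if index = idx then [item, PySem.List.pyGetD c index 0]
         else [PySem.List.pyGetD c index 0])) := by
  funext result index
  split <;> simp

-- a map of in-range lookups over a Nat-bounded range is the matching take/drop segment
theorem pv_map_get_range (xs : List Int) (a b : Nat) (hb : b ≤ xs.length) :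
    (PySem.List.pyRange (a : Int) (b : Int) 1).map (fun j => PySem.List.pyGetD xs j 0)
      = (xs.take b).drop a := by
  apply List.ext_getElem
  · rw [List.length_map, PySem.List.length_pyRange_one, List.length_drop, List.length_take]
    omega
  · intro k h1 h2
    have hk : a + k < b := by
      simp [PySem.List.length_pyRange_one] at h1; omega
    simp only [List.getElem_map, PySem.List.getElem_pyRange_one]
    have hcast : ((a : Int) + k) = ((a + k : Nat) : Int) := by push_cast; ring
    have hlt : a + k < xs.length := by omega
    rw [hcast, PySem.List.pyGetD_natCast]
    simp [List.getD, List.getElem?_eq_getElem hlt]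

-- the guarded body over a range that avoids idx is just the lookups
theorem pv_flatMap_ne (xs : List Int) (item idx : Int) (l : List Int)
    (h : ∀ j ∈ l, j ≠ idx) :
    l.flatMap
        (fun index => if index = idx then [item, PySem.List.pyGetD xs index 0]
                      else [PySem.List.pyGetD xs index 0])
      = l.map (fun j => PySem.List.pyGetD xs j 0) := by
  induction l with
  | nil => rfl
  | cons x t ih =>
    simp only [List.flatMap_cons, List.map_cons]
    rw [if_neg (h x (List.mem_cons_self)),
        ih (fun j hj => h j (List.mem_cons_of_mem x hj))]
    rfl

-- A's fold equals B's slice construction, stated over the shared adjusted index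
theorem pv_core (c : List Int) (item idx : Int) :
    (PySem.List.pyRange 0 (c.length : Int) 1).foldl
      (fun result index =>
        if index = idx then result ++ [item] ++ [PySem.List.pyGetD c index 0]
        else result ++ [PySem.List.pyGetD c index 0]) []
    = if 0 ≤ idx ∧ idx < (c.length : Int) then
        PySem.List.slice c none (some idx) ++ [item] ++ PySem.List.slice c (some idx) none
      else c := by
  rw [pv_step_eq, PySem.List.foldl_append_eq_flatMap, List.nil_append]
  by_cases hin : 0 ≤ idx ∧ idx < (c.length : Int)
  · rw [if_pos hin]
    obtain ⟨h0, hlen⟩ := hin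
    set i : Nat := idx.toNat with hi
    have hidx : idx = (i : Int) := by omega
    have hiL : i < c.length := by omega
    rw [PySem.List.pyRange_one_append 0 idx (c.length : Int) h0 (le_of_lt hlen),
        PySem.List.pyRange_one_append idx (idx + 1) (c.length : Int) (by omega) (by omega),
        List.flatMap_append, List.flatMap_append, PySem.List.pyRange_one_singleton]
    rw [pv_flatMap_ne c item idx _
        (by intro j hj; rw [PySem.List.mem_pyRange_one] at hj; omega)]
    rw [pv_flatMap_ne c item idx (PySem.List.pyRange (idx + 1) (c.length : Int) 1)
        (by intro j hj; rw [PySem.List.mem_pyRange_one] at hj; omega)]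
    have hleft : (PySem.List.pyRange 0 idx 1).map (fun j => PySem.List.pyGetD c j 0)
        = c.take i := by
      have := pv_map_get_range c 0 i (le_of_lt hiL)
      simpa [hidx] using this
    have hmid : PySem.List.pyGetD c idx 0 = c.getD i 0 := by
      rw [hidx, PySem.List.pyGetD_natCast]
    have hright : (PySem.List.pyRange (idx + 1) (c.length : Int) 1).map
        (fun j => PySem.List.pyGetD c j 0) = c.drop (i + 1) := by
      rw [PySem.List.map_pyGetD_pyRange' c 0 (a := idx + 1) (by omega)]
      congr 1
      omega
    have hdrop : c.drop i = c.getD i 0 :: c.drop (i + 1) := by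
      rw [List.drop_eq_getElem_cons hiL, List.getD, List.getElem?_eq_getElem hiL]
      rfl
    rw [hleft, hright, hidx, PySem.List.slice_to_natCast, PySem.List.slice_from_natCast, hdrop]
    simp only [List.flatMap_singleton, hidx] at hmid ⊢
    simp [hmid]
  · rw [if_neg hin]
    rw [pv_flatMap_ne c item idx (PySem.List.pyRange 0 (c.length : Int) 1)
        (by intro j hj; rw [PySem.List.mem_pyRange_one] at hj; omega)]
    exact PySem.List.map_pyGetD_pyRange_zero' c 0

-- ===== VERDICT (by name: the statement is the Claim_ definition above) =====
theorem manual_insert_spec : Claim_equal_manual_insert := by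
  intro collection item_insert index_insert _
  unfold Spec_manual_insert manual_insert manual_insert_alt
  exact pv_core collection item_insert _
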